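-- pv_equiv track=rewrite | github.com/Jithin-Garapati/ulog-api | tools/extract_static_param_tool.py | _determine_parameter_category
-- ===== SOURCE A (Python) =====
-- def _determine_parameter_category(param_row):
--     """
--     Determine the category of a parameter based on its name, group, and description.
--     Used for more targeted retrieval.
--     """
--     # Get relevant fields for categorization
--     name = str(param_row['name'] if 'name' in param_row else '').lower()
--     group = str(param_row['group'] if 'group' in param_row else '').lower()
--     short_desc = str(param_row['shortDesc'] if 'shortDesc' in param_row else '').lower()
--     long_desc = str(param_row['longDesc'] if 'longDesc' in param_row else '').lower()
--
--     # Combine all text for category detection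
--     all_text = f"{name} {group} {short_desc} {long_desc}"
--
--     # Define category keywords
--     categories = {
--         'speed': ['speed', 'velocity', 'how fast', 'pace', 'rate', 'knots', 'mph', 'kph',
--             'meters per second', 'm/s', 'ft/s', 'acceleration', 'deceleration', 'thrust'
--         ],
--         'altitude': ['altitude', 'height', 'elevation', 'how high', 'ceiling', 'agl', 'amsl',
--             'flight level', 'vertical'
--         ],
--         'position': ['position', 'location', 'coordinates', 'where', 'place', 'lat', 'latitude',
--             'lon', 'longitude', 'gps', 'coordinate'
--         ],
--         'attitude': ['attitude', 'orientation', 'rotation', 'angle', 'tilt', 'pitch', 'roll', 'yaw',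
--             'heading', 'direction'
--         ],
--         'battery': ['battery', 'power', 'charge', 'energy', 'fuel', 'voltage', 'current', 'capacity',
--             'drain', 'consumption', 'percentage', 'level'
--         ],
--         'motor': ['motor', 'propeller', 'rotor', 'rpm', 'thrust', 'esc', 'pwm'],
--         'sensor': ['sensor', 'imu', 'gyro', 'accelerometer', 'magnetometer', 'barometer', 'camera'],
--         'communication': ['communication', 'telemetry', 'radio', 'link', 'rc', 'protocol', 'mavlink'],
--         'safety': ['safety', 'safe', 'protection', 'security', 'safeguard', 'emergency', 'failsafe',
--             'abort', 'rescue', 'recover', 'protect', 'secure', 'precaution'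
--         ],
--         'navigation': ['navigation', 'waypoint', 'mission', 'route', 'path', 'trajectory', 'autopilot'],
--         'control': ['control', 'pid', 'tuning', 'gain', 'response', 'damping', 'filter', 'slew'],
--         'performance': ['performance', 'efficiency', 'optimization', 'limit', 'constraint', 'maximum', 'minimum']
--     }
--
--     # Look for category keywords in all text
--     matched_categories = []
--     for category, keywords in categories.items():
--         if any(keyword in all_text for keyword in keywords):
--             matched_categories.append(category)
--
--     # If multiple categories match, use the one with the most keyword matches
--     if len(matched_categories) > 1:
--         counts = {}
--         for category in matched_categories:
--             count = sum(1 for keyword in categories[category] if keyword in all_text)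
--             counts[category] = count
--
--         # Return the category with the most matches
--         return max(counts, key=counts.get)
--
--     # Return the single matched category or 'general' if none matched
--     return matched_categories[0] if matched_categories else 'general'
-- ===== SOURCE B (Python) =====
-- def _determine_parameter_category(param_row):
--     """One streaming pass: keep a running (best_cat, best_count); strict improvement
--     replaces, so the first maximal category wins and an all-zero pass leaves 'general'."""
--     all_text = ' '.join(
--         str(param_row[k] if k in param_row else '').lower()
--         for k in ('name', 'group', 'shortDesc', 'longDesc'))
--
--     categories = {
--         'speed': ['speed', 'velocity', 'how fast', 'pace', 'rate', 'knots', 'mph', 'kph',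
--             'meters per second', 'm/s', 'ft/s', 'acceleration', 'deceleration', 'thrust'
--         ],
--         'altitude': ['altitude', 'height', 'elevation', 'how high', 'ceiling', 'agl', 'amsl',
--             'flight level', 'vertical'
--         ],
--         'position': ['position', 'location', 'coordinates', 'where', 'place', 'lat', 'latitude',
--             'lon', 'longitude', 'gps', 'coordinate'
--         ],
--         'attitude': ['attitude', 'orientation', 'rotation', 'angle', 'tilt', 'pitch', 'roll', 'yaw',
--             'heading', 'direction'
--         ],
--         'battery': ['battery', 'power', 'charge', 'energy', 'fuel', 'voltage', 'current', 'capacity',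
--             'drain', 'consumption', 'percentage', 'level'
--         ],
--         'motor': ['motor', 'propeller', 'rotor', 'rpm', 'thrust', 'esc', 'pwm'],
--         'sensor': ['sensor', 'imu', 'gyro', 'accelerometer', 'magnetometer', 'barometer', 'camera'],
--         'communication': ['communication', 'telemetry', 'radio', 'link', 'rc', 'protocol', 'mavlink'],
--         'safety': ['safety', 'safe', 'protection', 'security', 'safeguard', 'emergency', 'failsafe',
--             'abort', 'rescue', 'recover', 'protect', 'secure', 'precaution'
--         ],
--         'navigation': ['navigation', 'waypoint', 'mission', 'route', 'path', 'trajectory', 'autopilot'],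
--         'control': ['control', 'pid', 'tuning', 'gain', 'response', 'damping', 'filter', 'slew'],
--         'performance': ['performance', 'efficiency', 'optimization', 'limit', 'constraint', 'maximum', 'minimum']
--     }
--
--     best_cat = 'general'
--     best_count = 0
--     for cat, kws in categories.items():
--         count = 0
--         for kw in kws:
--             if kw in all_text:
--                 count += 1
--         if best_count < count:
--             best_cat = cat
--             best_count = count
--     return best_cat
-- ===== Notes on version B (the rewrite author's own statement) =====
-- stated objective: simpler
-- what changed: A's two-phase scheme (collect matched_categories via any-keyword filter, then on a multi-match rebuild a counts dict and call max with a key function) is replaced by a single streaming pass that keeps a running (best_cat, best_count) accumulator, replacing only on a strictly larger count, so the first maximal category wins and an all-zero pass leaves 'general' without any intermediate list, dict or max call.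
import Mathlib
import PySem

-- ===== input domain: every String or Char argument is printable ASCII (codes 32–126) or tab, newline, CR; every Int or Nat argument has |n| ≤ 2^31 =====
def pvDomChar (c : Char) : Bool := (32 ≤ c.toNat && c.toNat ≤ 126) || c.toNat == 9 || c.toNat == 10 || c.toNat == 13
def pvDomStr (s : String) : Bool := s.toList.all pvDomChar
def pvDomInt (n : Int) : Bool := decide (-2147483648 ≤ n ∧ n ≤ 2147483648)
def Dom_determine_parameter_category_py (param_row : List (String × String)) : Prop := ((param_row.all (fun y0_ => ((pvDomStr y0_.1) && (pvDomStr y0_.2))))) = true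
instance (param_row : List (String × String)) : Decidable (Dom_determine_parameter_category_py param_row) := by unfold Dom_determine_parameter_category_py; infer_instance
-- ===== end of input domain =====

-- B replaces A's two-phase "filter matching categories, then recount on ties and take
-- max(counts, key=counts.get)" by ONE streaming pass with a running (best_cat, best_count)
-- accumulator (strict improvement replaces, zero best stays 'general'); objective: simpler.

-- The category keyword table both Python programs contain verbatim (shared literal data, not code).
def pvCategories : List (String × List String) := [
  ("speed", ["speed", "velocity", "how fast", "pace", "rate", "knots", "mph", "kph",
      "meters per second", "m/s", "ft/s", "acceleration", "deceleration", "thrust"]),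
  ("altitude", ["altitude", "height", "elevation", "how high", "ceiling", "agl", "amsl",
      "flight level", "vertical"]),
  ("position", ["position", "location", "coordinates", "where", "place", "lat", "latitude",
      "lon", "longitude", "gps", "coordinate"]),
  ("attitude", ["attitude", "orientation", "rotation", "angle", "tilt", "pitch", "roll", "yaw",
      "heading", "direction"]),
  ("battery", ["battery", "power", "charge", "energy", "fuel", "voltage", "current", "capacity",
      "drain", "consumption", "percentage", "level"]),
  ("motor", ["motor", "propeller", "rotor", "rpm", "thrust", "esc", "pwm"]),
  ("sensor", ["sensor", "imu", "gyro", "accelerometer", "magnetometer", "barometer", "camera"]),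
  ("communication", ["communication", "telemetry", "radio", "link", "rc", "protocol", "mavlink"]),
  ("safety", ["safety", "safe", "protection", "security", "safeguard", "emergency", "failsafe",
      "abort", "rescue", "recover", "protect", "secure", "precaution"]),
  ("navigation", ["navigation", "waypoint", "mission", "route", "path", "trajectory", "autopilot"]),
  ("control", ["control", "pid", "tuning", "gain", "response", "damping", "filter", "slew"]),
  ("performance", ["performance", "efficiency", "optimization", "limit", "constraint", "maximum", "minimum"])]

-- ===== PORT A =====
-- param_row['k'] if 'k' in param_row else ''   (dict lookup = first match in the association list)
def pvField (param_row : List (String × String)) (k : String) : String :=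
  match param_row.find? (fun p => p.1 == k) with
  | some p => p.2
  | none => ""

-- sum(1 for keyword in kws if keyword in all_text)   (A's generator sum)
def pvCnt (all_text : String) (kws : List String) : Int :=
  kws.foldl (fun acc kw => if PySem.Str.isIn kw all_text then acc + 1 else acc) 0

-- A's classification body, steps in A's order: build matched_categories; on a multi-match
-- recount per matched category via a dict and take max(counts, key=counts.get)
def pvCategorizeA (all_text : String) : String :=
  let matched := pvCategories.foldl
    (fun acc p => if p.2.any (fun kw => PySem.Str.isIn kw all_text) then acc ++ [p.1] else acc) []
  if 1 < matched.length then
    let counts := matched.foldl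
      (fun d c => d.insert c (pvCnt all_text ((PySem.Dict.ofList pvCategories).getD c [])))
      (PySem.Dict.empty : PySem.Dict String Int)
    (PySem.List.max? counts.keys (fun c => counts.getD c 0)).getD "general"
  else
    match matched with
    | [] => "general"
    | c :: _ => c

def determine_parameter_category_py (param_row : List (String × String)) : String :=
  let name := PySem.Str.lower (pvField param_row "name")
  let group := PySem.Str.lower (pvField param_row "group")
  let short_desc := PySem.Str.lower (pvField param_row "shortDesc")
  let long_desc := PySem.Str.lower (pvField param_row "longDesc")
  let all_text := PySem.Str.join " " [name, group, short_desc, long_desc]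
  pvCategorizeA all_text

-- ===== PORT B =====
-- B's lookup 'param_row[k] if k in param_row else '''  written as a direct scan
def bGet : List (String × String) → String → String
  | [], _ => ""
  | (k, v) :: t, key => if k == key then v else bGet t key

-- B's inner loop: count = 0; for kw in kws: if kw in all_text: count += 1
def bCount (all_text : String) (count : Int) : List String → Int
  | [] => count
  | kw :: rest => bCount all_text (if PySem.Str.isIn kw all_text then count + 1 else count) rest

-- B's outer loop: running (best_cat, best_count), replaced only on a strictly larger count
def bBest (all_text : String) (best_cat : String) (best_count : Int) :
    List (String × List String) → String
  | [] => best_cat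
  | (cat, kws) :: rest =>
      let count := bCount all_text 0 kws
      if best_count < count then bBest all_text cat count rest
      else bBest all_text best_cat best_count rest

def determine_parameter_category_py_alt (param_row : List (String × String)) : String :=
  let all_text := PySem.Str.join " "
    (["name", "group", "shortDesc", "longDesc"].map
      (fun k => PySem.Str.lower (bGet param_row k)))
  bBest all_text "general" 0 pvCategories

-- ===== PRECONDITION & SPEC =====
def Spec_determine_parameter_category_py (param_row : List (String × String)) (out : String) : Prop := out = determine_parameter_category_py_alt param_row
instance (param_row : List (String × String)) (out : String) : Decidable (Spec_determine_parameter_category_py param_row out) := by unfold Spec_determine_parameter_category_py; infer_instance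

-- ===== CLAIM (what is proved, stated in full; the proofs are below) =====
def Claim_equal_determine_parameter_category_py : Prop := ∀ (param_row : List (String × String)), Dom_determine_parameter_category_py param_row → Spec_determine_parameter_category_py param_row (determine_parameter_category_py param_row)

-- ===== LEMMAS AND PROOFS =====

-- proof-side intermediate form of the classifier: the full counts list and one max-by-count
def pvCategorizeM (all_text : String) : String :=
  match PySem.List.max? (pvCategories.map (fun p => (p.1, pvCnt all_text p.2))) (fun q => q.2) with
  | some q => if q.2 == 0 then "general" else q.1
  | none => "general"

-- the running best of Python's max(..., key=...): replace only on a strictly larger key (first max wins)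
def pvGo {α : Type} (k : α → Int) : α → List α → α
  | b, [] => b
  | b, x :: t => pvGo k (if k b < k x then x else b) t

lemma pvGo_foldl {α : Type} (k : α → Int) (b : α) (t : List α) :
    List.foldl (fun acc x => match acc with
      | none => some x
      | some m => if k m < k x then some x else some m) (some b) t = some (pvGo k b t) := by
  induction t generalizing b with
  | nil => rfl
  | cons x t ih =>
      simp only [List.foldl_cons, pvGo]
      by_cases h : k b < k x <;> simp [h, ih]

lemma pvGo_max? {α : Type} (k : α → Int) (b : α) (t : List α) :
    PySem.List.max? (b :: t) k = some (pvGo k b t) := by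
  unfold PySem.List.max?
  simp only [List.foldl_cons]
  exact pvGo_foldl k b t

lemma pvGo_filter {α : Type} (k : α → Int) (b : α) (t : List α) (hb : 0 < k b) :
    pvGo k b (t.filter (fun x => decide (0 < k x))) = pvGo k b t := by
  induction t generalizing b with
  | nil => rfl
  | cons x t ih =>
      by_cases hx : 0 < k x
      · simp only [List.filter_cons, hx, decide_true, if_true, pvGo]
        by_cases h : k b < k x
        · simpa [pvGo, h] using ih _ hx
        · simpa [pvGo, h] using ih _ hb
      · have hle : ¬ k b < k x := by omega
        simp only [List.filter_cons, hx, decide_false, pvGo, if_neg hle]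
        exact ih _ hb

lemma pvGo_skip {α : Type} (k : α → Int) (b : α) (t : List α) (hb : k b ≤ 0)
    (h : ∃ x ∈ t, 0 < k x) :
    PySem.List.max? (t.filter (fun x => decide (0 < k x))) k = some (pvGo k b t) := by
  induction t generalizing b with
  | nil => simp at h
  | cons y t ih =>
      by_cases hy : 0 < k y
      · have hby : k b < k y := by omega
        simp only [List.filter_cons, hy, decide_true, if_true, pvGo, if_pos hby]
        rw [pvGo_max?]
        rw [pvGo_filter k y t hy]
      · have h' : ∃ x ∈ t, 0 < k x := by
          rcases h with ⟨x, hx, hkx⟩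
          rcases List.mem_cons.mp hx with rfl | hx
          · exact absurd hkx hy
          · exact ⟨x, hx, hkx⟩
        have hb' : k (if k b < k y then y else b) ≤ 0 := by
          by_cases hc : k b < k y <;> simp [hc] <;> omega
        simp only [List.filter_cons, hy, decide_false, pvGo]
        exact ih _ hb' h'

lemma pvMax?_filter_pos {α : Type} (k : α → Int) (l : List α) (h : ∃ x ∈ l, 0 < k x) :
    PySem.List.max? (l.filter (fun x => decide (0 < k x))) k = PySem.List.max? l k := by
  cases l with
  | nil => simp at h
  | cons x t =>
      by_cases hx : 0 < k x
      · simp only [List.filter_cons, hx, decide_true, if_true]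
        rw [pvGo_max?, pvGo_max?, pvGo_filter k x t hx]
      · have h' : ∃ y ∈ t, 0 < k y := by
          rcases h with ⟨y, hy, hky⟩
          rcases List.mem_cons.mp hy with rfl | hy
          · exact absurd hky hx
          · exact ⟨y, hy, hky⟩
        have hb : k x ≤ 0 := by omega
        simp only [List.filter_cons, hx, decide_false]
        rw [pvGo_max? k x t]
        exact pvGo_skip k x t hb h'

lemma pvGo_congr {α : Type} (k1 k2 : α → Int) (b : α) (t : List α)
    (hb : k1 b = k2 b) (ht : ∀ x ∈ t, k1 x = k2 x) :
    pvGo k1 b t = pvGo k2 b t := by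
  induction t generalizing b with
  | nil => rfl
  | cons x t ih =>
      have hx := ht x (List.mem_cons_self ..)
      have ht' : ∀ y ∈ t, k1 y = k2 y := fun y hy => ht y (List.mem_cons_of_mem _ hy)
      simp only [pvGo, hb, hx]
      by_cases h : k2 b < k2 x
      · simp only [if_pos h]; exact ih x hx ht'
      · simp only [if_neg h]; exact ih b hb ht'

lemma pvMax?_congr {α : Type} (k1 k2 : α → Int) (l : List α)
    (h : ∀ x ∈ l, k1 x = k2 x) :
    PySem.List.max? l k1 = PySem.List.max? l k2 := by
  cases l with
  | nil => rfl
  | cons x t =>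
      rw [pvGo_max?, pvGo_max?]
      exact congrArg some (pvGo_congr k1 k2 x t (h x (List.mem_cons_self ..))
        (fun y hy => h y (List.mem_cons_of_mem _ hy)))

lemma pvGo_map {α β : Type} (f : α → β) (k : β → Int) (b : α) (t : List α) :
    pvGo k (f b) (t.map f) = f (pvGo (fun x => k (f x)) b t) := by
  induction t generalizing b with
  | nil => rfl
  | cons x t ih =>
      simp only [List.map_cons, pvGo]
      by_cases h : k (f b) < k (f x) <;> simp [h, ih]

lemma pvMax?_map {α β : Type} (f : α → β) (k : β → Int) (l : List α) :
    PySem.List.max? (l.map f) k = (PySem.List.max? l (fun x => k (f x))).map f := by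
  cases l with
  | nil => rfl
  | cons x t =>
      simp only [List.map_cons]
      rw [pvGo_max?, pvGo_max?]
      simp [pvGo_map]

-- the dict loop 'for c in l: d[c] = g c' over fresh distinct keys appends the pairs in order
lemma pvFoldl_insert_fresh (g : String → Int) (ps : List (String × Int)) (l : List String)
    (hnd : l.Nodup) (hf : ∀ c ∈ l, (PySem.Dict.mk ps).contains c = false) :
    l.foldl (fun d c => d.insert c (g c)) (PySem.Dict.mk ps)
      = PySem.Dict.mk (ps ++ l.map (fun c => (c, g c))) := by
  induction l generalizing ps with
  | nil => simp
  | cons c l ih =>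
      have hc : (PySem.Dict.mk ps).contains c = false := hf c (List.mem_cons_self ..)
      rw [List.foldl_cons]
      have hstep : (PySem.Dict.mk ps).insert c (g c) = PySem.Dict.mk (ps ++ [(c, g c)]) := by
        simp [PySem.Dict.insert, hc]
      rw [hstep]
      have hf' : ∀ c' ∈ l, (PySem.Dict.mk (ps ++ [(c, g c)])).contains c' = false := by
        intro c' hc'
        have h1 : (PySem.Dict.mk ps).contains c' = false := hf c' (List.mem_cons_of_mem _ hc')
        have h2 : c' ≠ c := fun h => (List.nodup_cons.mp hnd).1 (h ▸ hc')
        simp only [PySem.Dict.contains, List.any_append, List.any_cons, List.any_nil] at h1 ⊢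
        simp [h1]
        exact fun h => h2 h.symm
      have := ih (ps ++ [(c, g c)]) (List.nodup_cons.mp hnd).2 hf'
      rw [this, List.append_assoc]
      rfl

lemma pvGetD_mk_map (g : String → Int) (l : List String) (c : String) (hc : c ∈ l) :
    (PySem.Dict.mk (l.map (fun x => (x, g x))) : PySem.Dict String Int).getD c 0 = g c := by
  induction l with
  | nil => simp at hc
  | cons x t ih =>
      simp only [List.map_cons, PySem.Dict.getD, PySem.Dict.get?_mk_cons]
      by_cases h : x = c
      · simp [h]
      · have : c ∈ t := by
          rcases List.mem_cons.mp hc with rfl | ht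
          · exact absurd rfl h
          · exact ht
        simpa [h, PySem.Dict.getD] using ih this

lemma pvCnt_pos_iff (t : String) (kws : List String) :
    (kws.any (fun kw => PySem.Str.isIn kw t)) = decide (0 < pvCnt t kws) := by
  unfold pvCnt
  rw [PySem.List.foldl_if_add_one (fun kw => PySem.Str.isIn kw t) kws 0, zero_add]
  rcases h : kws.any (fun kw => PySem.Str.isIn kw t) with _ | _
  · have h0 : kws.countP (fun kw => PySem.Str.isIn kw t) = 0 :=
      List.countP_eq_zero.mpr (fun a ha => List.any_eq_false.mp h a ha)
    rw [h0]
    simp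
  · have h0 : 0 < kws.countP (fun kw => PySem.Str.isIn kw t) :=
      List.countP_pos_iff.mpr (List.any_eq_true.mp h)
    rw [eq_comm, decide_eq_true_iff]
    exact_mod_cast h0

lemma pvCnt_nonneg (t : String) (kws : List String) : 0 ≤ pvCnt t kws := by
  unfold pvCnt
  rw [PySem.List.foldl_if_add_one (fun kw => PySem.Str.isIn kw t) kws 0]
  positivity

lemma pvCats_getD : ∀ p ∈ pvCategories, (PySem.Dict.ofList pvCategories).getD p.1 [] = p.2 := by
  decide

lemma pvCats_names_nodup : (pvCategories.map (fun p => p.1)).Nodup := by decide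

lemma pvMapFstPairs {β : Type} (g : String → β) (L : List String) :
    List.map (fun x : String × β => x.1) (List.map (fun c => (c, g c)) L) = L := by
  simp [Function.comp_def]

-- A's two-phase body equals the intermediate counts-list-and-max form
lemma pv_coreA (t : String) : pvCategorizeA t = pvCategorizeM t := by
  unfold pvCategorizeA pvCategorizeM
  rw [PySem.List.foldl_append_if (fun p : String × List String => p.2.any (fun kw => PySem.Str.isIn kw t))
      (fun p => p.1) pvCategories []]
  rw [List.nil_append]
  rw [List.filter_congr (fun (p : String × List String) _ => pvCnt_pos_iff t p.2)]
  set F := pvCategories.filter (fun p => decide (0 < pvCnt t p.2)) with hF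
  have hsub : F.Sublist pvCategories := hF ▸ (List.filter_sublist : (pvCategories.filter (fun p => decide (0 < pvCnt t p.2))).Sublist pvCategories)
  have hnd : (F.map (fun p => p.1)).Nodup :=
    List.Nodup.sublist (hsub.map (fun p => p.1)) pvCats_names_nodup
  have hins := pvFoldl_insert_fresh (fun c => pvCnt t ((PySem.Dict.ofList pvCategories).getD c []))
      [] (F.map (fun p => p.1)) hnd (fun c _ => rfl)
  rw [List.nil_append] at hins
  have hempty : (PySem.Dict.empty : PySem.Dict String Int) = PySem.Dict.mk [] := rfl
  simp only [hempty, hins, PySem.Dict.keys_mk, pvMapFstPairs]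
  have hcongr : PySem.List.max? (List.map (fun p => p.1) F)
      (fun c => (PySem.Dict.mk (List.map (fun c => (c, pvCnt t ((PySem.Dict.ofList pvCategories).getD c []))) (List.map (fun p => p.1) F))).getD c 0)
      = PySem.List.max? (List.map (fun p => p.1) F) (fun c => pvCnt t ((PySem.Dict.ofList pvCategories).getD c [])) :=
    pvMax?_congr _ _ _ (fun c hc => pvGetD_mk_map _ _ c hc)
  rw [hcongr]
  rw [pvMax?_map (fun p : String × List String => p.1) (fun c => pvCnt t ((PySem.Dict.ofList pvCategories).getD c [])) F]
  have hcongr2 : PySem.List.max? F (fun x => pvCnt t ((PySem.Dict.ofList pvCategories).getD x.1 []))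
      = PySem.List.max? F (fun p => pvCnt t p.2) :=
    pvMax?_congr _ _ _ (fun p hp => by rw [pvCats_getD p (List.mem_of_mem_filter (hF ▸ hp))])
  rw [hcongr2]
  rw [pvMax?_map (fun p : String × List String => (p.1, pvCnt t p.2)) (fun q : String × Int => q.2) pvCategories]
  by_cases hpos : ∃ p ∈ pvCategories, 0 < pvCnt t p.2
  · obtain ⟨p0, hp0, hp0pos⟩ := hpos
    have hFmax : PySem.List.max? F (fun p => pvCnt t p.2) = PySem.List.max? pvCategories (fun p => pvCnt t p.2) := by
      rw [hF]
      exact pvMax?_filter_pos _ _ ⟨p0, hp0, hp0pos⟩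
    obtain ⟨q, hq⟩ : ∃ q, PySem.List.max? pvCategories (fun p => pvCnt t p.2) = some q := by
      cases h : PySem.List.max? pvCategories (fun p => pvCnt t p.2) with
      | none => rw [PySem.List.max?_eq_none_iff] at h; exact absurd h (by decide)
      | some q => exact ⟨q, rfl⟩
    have hqpos : 0 < pvCnt t q.2 := by
      have := PySem.List.max?_isMax hq p0 hp0
      omega
    have hqne : (pvCnt t q.2 == 0) = false := by
      simp only [beq_eq_false_iff_ne, ne_eq]
      omega
    have hp0F : p0 ∈ F := by
      rw [hF]
      exact List.mem_filter.mpr ⟨hp0, by simpa using hp0pos⟩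
    rw [hFmax, hq]
    simp only [Option.map_some, Option.getD_some, hqne]
    clear_value F
    cases F with
    | nil => exact absurd hp0F List.not_mem_nil
    | cons f rest =>
      cases rest with
      | nil =>
        have hf : f = q := by
          rw [pvGo_max?] at hFmax
          simp only [pvGo] at hFmax
          rw [hq] at hFmax
          exact Option.some.inj hFmax
        simp [hf]
      | cons f2 rest2 =>
        simp
  · have hF0 : F = [] := by
      rw [hF]
      refine List.filter_eq_nil_iff.mpr (fun p hp => ?_)
      simp only [decide_eq_true_eq]
      push Not at hpos
      have := hpos p hp
      omega
    obtain ⟨q, hq⟩ : ∃ q, PySem.List.max? pvCategories (fun p => pvCnt t p.2) = some q := by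
      cases h : PySem.List.max? pvCategories (fun p => pvCnt t p.2) with
      | none => rw [PySem.List.max?_eq_none_iff] at h; exact absurd h (by decide)
      | some q => exact ⟨q, rfl⟩
    have hq0 : pvCnt t q.2 = 0 := by
      have hmem := PySem.List.max?_mem hq
      push Not at hpos
      have h1 := hpos q hmem
      have h2 := pvCnt_nonneg t q.2
      omega
    rw [hF0, hq]
    simp [hq0]

-- ===== bridging lemmas: B's streaming pass equals the intermediate form =====

lemma bGet_eq_pvField (l : List (String × String)) (k : String) : bGet l k = pvField l k := by
  induction l with
  | nil => rfl
  | cons p t ih =>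
      obtain ⟨a, v⟩ := p
      by_cases h : a == k
      · simp [bGet, pvField, List.find?, h]
      · simp only [bGet, pvField, List.find?, h]
        simpa [pvField, if_neg] using ih

lemma bCount_foldl (t : String) (acc : Int) (l : List String) :
    bCount t acc l = l.foldl (fun a kw => if PySem.Str.isIn kw t then a + 1 else a) acc := by
  induction l generalizing acc with
  | nil => rfl
  | cons kw r ih => simp only [bCount, List.foldl_cons, ih]

lemma bCount_eq_pvCnt (t : String) (l : List String) : bCount t 0 l = pvCnt t l :=
  bCount_foldl t 0 l

lemma bBest_pvGo (t : String) (bc : String) (bn : Int) (L : List (String × List String)) :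
    bBest t bc bn L = (pvGo (fun q : String × Int => q.2) (bc, bn)
      (L.map (fun p => (p.1, pvCnt t p.2)))).1 := by
  induction L generalizing bc bn with
  | nil => rfl
  | cons p rest ih =>
      obtain ⟨cat, kws⟩ := p
      simp only [bBest, List.map_cons, pvGo, bCount_eq_pvCnt]
      by_cases h : bn < pvCnt t kws
      · simp only [if_pos h]; exact ih cat (pvCnt t kws)
      · simp only [if_neg h]; exact ih bc bn

lemma pvGo_stay {α : Type} (k : α → Int) (b : α) (l : List α)
    (h : ∀ x ∈ l, ¬ k b < k x) : pvGo k b l = b := by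
  induction l with
  | nil => rfl
  | cons x t ih =>
      simp only [pvGo, if_neg (h x (List.mem_cons_self ..))]
      exact ih (fun y hy => h y (List.mem_cons_of_mem _ hy))

-- B's streaming pass equals the intermediate counts-list-and-max form
lemma pv_coreB (t : String) : pvCategorizeM t = bBest t "general" 0 pvCategories := by
  unfold pvCategorizeM
  rw [bBest_pvGo]
  set counts := pvCategories.map (fun p => (p.1, pvCnt t p.2)) with hc
  have hnn : ∀ q ∈ counts, 0 ≤ q.2 := by
    intro q hq
    rw [hc] at hq
    obtain ⟨p, _, rfl⟩ := List.mem_map.mp hq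
    exact pvCnt_nonneg t p.2
  by_cases hpos : ∃ q ∈ counts, 0 < q.2
  · -- some category matches: the sentinel is replaced and both sides are the first max
    have hskip := pvGo_skip (fun q : String × Int => q.2) (("general", 0) : String × Int)
      counts (by norm_num) hpos
    have hfil := pvMax?_filter_pos (fun q : String × Int => q.2) counts hpos
    have hmax : PySem.List.max? counts (fun q => q.2)
        = some (pvGo (fun q : String × Int => q.2) ("general", 0) counts) := by
      rw [← hfil, hskip]
    rw [hmax]
    set g := pvGo (fun q : String × Int => q.2) ("general", 0) counts with hg
    obtain ⟨q0, hq0, hq0pos⟩ := hpos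
    have hgmax := PySem.List.max?_isMax hmax q0 hq0
    have hgne : (g.2 == 0) = false := by
      simp only [beq_eq_false_iff_ne, ne_eq]
      omega
    simp [hgne]
  · -- no category matches: every count is 0, the sentinel survives, both sides 'general'
    have hall : ∀ q ∈ counts, ¬ ((("general", 0) : String × Int).2 < q.2) := by
      intro q hq
      push Not at hpos
      have := hpos q hq
      simp only
      omega
    rw [pvGo_stay _ _ _ hall]
    obtain ⟨q, hq⟩ : ∃ q, PySem.List.max? counts (fun q : String × Int => q.2) = some q := by
      cases h : PySem.List.max? counts (fun q : String × Int => q.2) with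
      | none =>
          rw [PySem.List.max?_eq_none_iff, hc, List.map_eq_nil_iff] at h
          exact absurd h (by decide)
      | some q => exact ⟨q, rfl⟩
    have hq0 : q.2 = 0 := by
      have hmem := PySem.List.max?_mem hq
      push Not at hpos
      have h1 := hpos q hmem
      have h2 := hnn q hmem
      omega
    rw [hq]
    simp [hq0]

-- ===== VERDICT (by name: the statement is the Claim_ definition above) =====
theorem determine_parameter_category_py_spec : Claim_equal_determine_parameter_category_py := by
  intro param_row _
  show determine_parameter_category_py param_row = determine_parameter_category_py_alt param_row
  unfold determine_parameter_category_py determine_parameter_category_py_alt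
  simp only [List.map_cons, List.map_nil, bGet_eq_pvField]
  rw [pv_coreA, pv_coreB]
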